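-- pv_equiv track=rewrite | github.com/olicand/eve-skills | eve-frontier-utopia-analysis/scripts/extract_utopia_artifacts.py | group_interactable_modules
-- ===== SOURCE A (Python) =====
-- INTERACTABLE_GROUPS = {
--     "station_flow": (
--         "frontier/station/",
--         "frontier/station_hud/",
--         "eve/client/script/ui/station/",
--     ),
--     "assembly_and_building": (
--         "frontier/base_building/",
--         "frontier/smart_assemblies/",
--     ),
--     "gates_and_travel": (
--         "frontier/jump_drive/",
--         "frontier/warping/",
--         "frontier/crdata/common/objects/cr_stargate.pyc",
--         "eveProto/generated/eve/assembly/gate/",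
--     ),
--     "scanning_and_sites": (
--         "frontier/signatures_and_scanning/",
--         "eveProto/generated/eve/deadspace/",
--         "eveProto/generated/eve/dungeon/",
--         "eveProto/generated/eve/character/hacking/",
--     ),
--     "operations_and_objectives": (
--         "eveProto/generated/eve/character/operation/",
--         "eveProto/generated/eve/operation/",
--         "frontier/keeper/",
--     ),
--     "planetary_and_resources": (
--         "eveProto/generated/eve/planetinteraction/",
--         "eveProto/generated/eve/planet/",
--     ),
--     "legacy_structure_ui": ("eve/client/script/ui/structure/",),
-- }
--
-- def group_interactable_modules(catalog: list[dict[str, object]]) -> dict[str, list[str]]: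
--     paths = [entry["path"] for entry in catalog]
--     grouped: dict[str, list[str]] = {}
--     for group_name, prefixes in INTERACTABLE_GROUPS.items():
--         matches = [
--             path
--             for path in paths
--             if any(path.startswith(prefix) or path == prefix for prefix in prefixes)
--         ]
--         grouped[group_name] = matches
--     return grouped
-- ===== SOURCE B (Python) =====
-- INTERACTABLE_GROUPS = {
--     "station_flow": (
--         "frontier/station/",
--         "frontier/station_hud/",
--         "eve/client/script/ui/station/",
--     ),
--     "assembly_and_building": (
--         "frontier/base_building/",
--         "frontier/smart_assemblies/",
--     ),
--     "gates_and_travel": (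
--         "frontier/jump_drive/",
--         "frontier/warping/",
--         "frontier/crdata/common/objects/cr_stargate.pyc",
--         "eveProto/generated/eve/assembly/gate/",
--     ),
--     "scanning_and_sites": (
--         "frontier/signatures_and_scanning/",
--         "eveProto/generated/eve/deadspace/",
--         "eveProto/generated/eve/dungeon/",
--         "eveProto/generated/eve/character/hacking/",
--     ),
--     "operations_and_objectives": (
--         "eveProto/generated/eve/character/operation/",
--         "eveProto/generated/eve/operation/",
--         "frontier/keeper/",
--     ),
--     "planetary_and_resources": (
--         "eveProto/generated/eve/planetinteraction/",
--         "eveProto/generated/eve/planet/",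
--     ),
--     "legacy_structure_ui": ("eve/client/script/ui/structure/",),
-- }
--
-- # Inverted hash index: each (unique) prefix maps to its group, and matching a path
-- # means slicing it at each prefix length present in the table and doing one dict
-- # lookup -- no per-group scan over prefix tuples.
-- _PREFIX_TO_GROUP = {p: name for name, ps in INTERACTABLE_GROUPS.items() for p in ps}
-- _LENGTHS = sorted({len(p) for p in _PREFIX_TO_GROUP})
--
--
-- def group_interactable_modules(catalog: list[dict[str, object]]) -> dict[str, list[str]]:
--     grouped: dict[str, list[str]] = {name: [] for name in INTERACTABLE_GROUPS}
--     for entry in catalog: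
--         path = entry["path"]
--         for length in _LENGTHS:
--             if length > len(path):
--                 break
--             name = _PREFIX_TO_GROUP.get(path[:length])
--             if name is not None:
--                 grouped[name].append(path)
--     return grouped
-- ===== Notes on version B (the rewrite author's own statement) =====
-- stated objective: alternative
-- what changed: B replaces A's per-group filtering scans over prefix tuples with an inverted hash index: a precomputed prefix-to-group dict plus the sorted list of prefix lengths, so each path is matched by slicing it at each candidate length and doing one dict lookup instead of testing every prefix of every group.
import Mathlib
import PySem

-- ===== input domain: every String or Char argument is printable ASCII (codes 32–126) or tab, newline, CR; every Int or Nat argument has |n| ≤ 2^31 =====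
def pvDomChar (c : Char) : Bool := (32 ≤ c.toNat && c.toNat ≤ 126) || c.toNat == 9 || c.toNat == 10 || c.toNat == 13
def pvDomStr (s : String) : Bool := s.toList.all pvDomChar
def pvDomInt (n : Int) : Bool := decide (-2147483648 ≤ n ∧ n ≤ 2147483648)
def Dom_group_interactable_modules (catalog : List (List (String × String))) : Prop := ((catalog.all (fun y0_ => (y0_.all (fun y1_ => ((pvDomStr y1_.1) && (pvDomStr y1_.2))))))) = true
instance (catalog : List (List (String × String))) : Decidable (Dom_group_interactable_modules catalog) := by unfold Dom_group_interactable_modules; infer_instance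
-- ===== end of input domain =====

-- B replaces A's per-group scans over prefix tuples by an inverted hash index:
-- each path is sliced at every prefix length present in the table and looked up
-- in a prefix→group dictionary; same results, different algorithm (no speed claim).

-- the module constant INTERACTABLE_GROUPS (shared context of both programs)
def PV_GROUPS : List (String × List String) :=
  [ ("station_flow",
      ["frontier/station/", "frontier/station_hud/", "eve/client/script/ui/station/"]),
    ("assembly_and_building",
      ["frontier/base_building/", "frontier/smart_assemblies/"]),
    ("gates_and_travel",
      ["frontier/jump_drive/", "frontier/warping/",
       "frontier/crdata/common/objects/cr_stargate.pyc",
       "eveProto/generated/eve/assembly/gate/"]),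
    ("scanning_and_sites",
      ["frontier/signatures_and_scanning/", "eveProto/generated/eve/deadspace/",
       "eveProto/generated/eve/dungeon/", "eveProto/generated/eve/character/hacking/"]),
    ("operations_and_objectives",
      ["eveProto/generated/eve/character/operation/", "eveProto/generated/eve/operation/",
       "frontier/keeper/"]),
    ("planetary_and_resources",
      ["eveProto/generated/eve/planetinteraction/", "eveProto/generated/eve/planet/"]),
    ("legacy_structure_ui",
      ["eve/client/script/ui/structure/"]) ]

-- ===== PORT A =====
-- entry["path"]: first-match association-list lookup; Pre_ guarantees the key is present,
-- so the `.getD ""` default is never used on admitted inputs (Python raises KeyError there).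
def pvGetPathA (entry : List (String × String)) : String :=
  ((entry.find? (fun kv => kv.1 == "path")).map (·.2)).getD ""

def pvMatchA (path : String) (prefixes : List String) : Bool :=
  prefixes.any (fun p => PySem.Str.startswith path p || path == p)

def group_interactable_modules (catalog : List (List (String × String))) : List (String × List String) :=
  let paths := catalog.map pvGetPathA
  PV_GROUPS.foldl
    (fun grouped g => grouped ++ [(g.1, paths.filter (fun path => pvMatchA path g.2))]) []

-- ===== PORT B =====
def pvGetPathB (entry : List (String × String)) : String :=
  ((entry.find? (fun kv => kv.1 == "path")).map (·.2)).getD ""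

-- _PREFIX_TO_GROUP = {p: name for name, ps in INTERACTABLE_GROUPS.items() for p in ps}
def PV_PREFIX_TO_GROUP : PySem.Dict String String :=
  PV_GROUPS.foldl (fun d g => g.2.foldl (fun d p => d.insert p g.1) d) PySem.Dict.empty

-- _LENGTHS = sorted({len(p) for p in _PREFIX_TO_GROUP})  (set consumed by key-less
-- sorted, so the result does not depend on the set's iteration order)
def PV_LENGTHS : List Int :=
  PySem.List.sorted (PySem.Set.ofList (PV_PREFIX_TO_GROUP.keys.map PySem.Str.len)) (fun x => x) false

-- `for length in _LENGTHS: if length > len(path): break …` — _LENGTHS is sorted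
-- ascending, so the body runs exactly on the takeWhile-prefix of the list: exact.
def pvLens (path : String) : List Int :=
  PV_LENGTHS.takeWhile (fun l => decide (l ≤ PySem.Str.len path))

-- _PREFIX_TO_GROUP.get(path[:length])
def pvLook (path : String) (l : Int) : Option String :=
  PySem.Dict.get? PV_PREFIX_TO_GROUP (PySem.Str.slice path none (some l))

-- the body of `for entry in catalog`: the inner loop over the candidate lengths.
-- grouped[name].append(path): name is always a pre-created key on admitted inputs,
-- so the `[]` default of `modify` is never used there.
def pvInner (path : String) (grouped : PySem.Dict String (List String)) : PySem.Dict String (List String) :=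
  (pvLens path).foldl
    (fun grouped l =>
      match pvLook path l with
      | some name => PySem.Dict.modify grouped name [] (fun xs => xs ++ [path])
      | none => grouped)
    grouped

def group_interactable_modules_alt (catalog : List (List (String × String))) : List (String × List String) :=
  let init : PySem.Dict String (List String) :=
    PySem.Dict.mk (PV_GROUPS.map (fun g => (g.1, ([] : List String))))
  (catalog.foldl (fun grouped entry => pvInner (pvGetPathB entry) grouped) init).items

-- ===== PRECONDITION & SPEC =====
-- Pre_ excludes exactly the catalogs containing an entry without a "path" key, on which
-- both Pythons raise KeyError.
def Pre_group_interactable_modules (catalog : List (List (String × String))) : Prop :=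
  ∀ entry ∈ catalog, entry.any (fun kv => kv.1 == "path") = true
instance (catalog : List (List (String × String))) : Decidable (Pre_group_interactable_modules catalog) := by unfold Pre_group_interactable_modules; infer_instance

def pvWitness_group_interactable_modules : (List (List (String × String))) :=
  [[("path", "frontier/keeper/x.pyc")], [("path", "zzz")]]

def Spec_group_interactable_modules (catalog : List (List (String × String))) (out : List (String × List String)) : Prop := out = group_interactable_modules_alt catalog
instance (catalog : List (List (String × String))) (out : List (String × List String)) : Decidable (Spec_group_interactable_modules catalog out) := by unfold Spec_group_interactable_modules; infer_instance

-- ===== CLAIM (what is proved, stated in full; the proofs are below) =====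
def Claim_equal_group_interactable_modules : Prop := ∀ (catalog : List (List (String × String))), Dom_group_interactable_modules catalog → Pre_group_interactable_modules catalog → Spec_group_interactable_modules catalog (group_interactable_modules catalog)

-- ===== LEMMAS AND PROOFS =====

-- proof-side abbreviations for B's inner loop
def pvE (path : String) : List String := (pvLens path).filterMap (pvLook path)

def pvMatchB (path : String) (ps : List String) : Bool :=
  ps.any (fun p => PySem.Str.startswith path p)

def pvNames : List String := PV_GROUPS.map (·.1)

-- the inner loop's match-on-lookup fold is the fold over the filterMap of lookups
theorem pv_foldl_match (path : String) (L : List Int) (g0 : PySem.Dict String (List String)) :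
    L.foldl
      (fun grouped l =>
        match pvLook path l with
        | some name => PySem.Dict.modify grouped name [] (fun xs => xs ++ [path])
        | none => grouped) g0
    = (L.filterMap (pvLook path)).foldl
        (fun grouped name => PySem.Dict.modify grouped name [] (fun xs => xs ++ [path])) g0 := by
  induction L generalizing g0 with
  | nil => rfl
  | cons l L ih =>
      simp only [List.foldl_cons, List.filterMap_cons]
      cases h : pvLook path l with
      | none => simp [ih]
      | some name => simp [ih]

-- a takeWhile (· ≤ c) on a ≤-sorted list keeps every element ≤ c
theorem pv_mem_takeWhile_sorted (L : List Int) (c l : Int)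
    (hs : L.Pairwise (· ≤ ·)) (hl : l ∈ L) (hle : l ≤ c) :
    l ∈ L.takeWhile (fun x => decide (x ≤ c)) := by
  induction L with
  | nil => simp at hl
  | cons a L ih =>
      rcases List.pairwise_cons.mp hs with ⟨ha, hs'⟩
      rcases List.mem_cons.mp hl with rfl | hl'
      · simp [hle]
      · have hal : a ≤ l := ha l hl'
        have hac : a ≤ c := le_trans hal hle
        simp only [List.takeWhile_cons, decide_eq_true_eq, hac, if_pos]
        simp
        exact Or.inr (by simpa using ih hs' hl')

-- every name emitted by a lookup is a group name
theorem pv_E_subset_names (path : String) (nm : String) (h : nm ∈ pvE path) : nm ∈ pvNames := by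
  rcases List.mem_filterMap.mp h with ⟨l, _, hlook⟩
  have hnd : PV_PREFIX_TO_GROUP.keys.Nodup := by decide
  have hmem := (PySem.Dict.get?_eq_some_iff_mem_items PV_PREFIX_TO_GROUP _ nm hnd).mp hlook
  have hv : nm ∈ PV_PREFIX_TO_GROUP.values := List.mem_map_of_mem hmem
  have hall : ∀ x ∈ PV_PREFIX_TO_GROUP.values, x ∈ pvNames := by decide
  exact hall nm hv

-- decidable facts about the constant tables
theorem pv_H1 : ∀ gp ∈ PV_GROUPS, ∀ pr ∈ PV_PREFIX_TO_GROUP.items, pr.2 = gp.1 → pr.1 ∈ gp.2 := by decide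
theorem pv_H2 : ∀ gp ∈ PV_GROUPS, ∀ p ∈ gp.2, (p, gp.1) ∈ PV_PREFIX_TO_GROUP.items := by decide
theorem pv_H3 : ∀ gp ∈ PV_GROUPS, ∀ p1 ∈ gp.2, ∀ p2 ∈ gp.2, p1.toList <+: p2.toList → p1 = p2 := by decide
theorem pv_H4 : ∀ gp ∈ PV_GROUPS, ∀ p ∈ gp.2, ((p.toList.length : Int)) ∈ PV_LENGTHS := by decide
theorem pv_H5 : ∀ l ∈ PV_LENGTHS, 0 < l := by decide
theorem pv_H6 : PV_LENGTHS.Pairwise (· ≤ ·) := by decide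
theorem pv_H7 : PV_LENGTHS.Nodup := by decide
theorem pv_H8 : PV_PREFIX_TO_GROUP.keys.Nodup := by decide

theorem pv_toList_slice_take (path : String) (l : Int) (hl : 0 ≤ l) :
    (PySem.Str.slice path none (some l)).toList = path.toList.take l.toNat := by
  rw [PySem.Str.toList_slice, PySem.Chars.slice_eq_listSlice, PySem.List.slice_to _ hl]

theorem pv_mem_pvLens (path : String) (l : Int) (h : l ∈ pvLens path) :
    l ∈ PV_LENGTHS ∧ l ≤ (path.toList.length : Int) := by
  refine ⟨(List.takeWhile_sublist _).mem h, ?_⟩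
  have := List.mem_takeWhile_imp h
  simpa [PySem.Str.len_eq] using this

theorem pv_mem_pvLens_of (path : String) (l : Int)
    (h1 : l ∈ PV_LENGTHS) (h2 : l ≤ (path.toList.length : Int)) : l ∈ pvLens path := by
  apply pv_mem_takeWhile_sorted _ _ _ pv_H6 h1
  simpa [PySem.Str.len_eq] using h2

-- a successful lookup comes from a table prefix of the path of length l
theorem pv_look_some (path : String) (l : Int) (nm : String)
    (hl : l ∈ pvLens path) (h : pvLook path l = some nm) :
    ∃ s : String, (s, nm) ∈ PV_PREFIX_TO_GROUP.items ∧ s.toList <+: path.toList ∧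
      (s.toList.length : Int) = l := by
  obtain ⟨hL, hle⟩ := pv_mem_pvLens path l hl
  have hpos : 0 < l := pv_H5 l hL
  have hmem := (PySem.Dict.get?_eq_some_iff_mem_items PV_PREFIX_TO_GROUP _ nm pv_H8).mp h
  refine ⟨_, hmem, ?_, ?_⟩
  · rw [pv_toList_slice_take path l (le_of_lt hpos)]
    exact List.take_prefix _ _
  · rw [pv_toList_slice_take path l (le_of_lt hpos)]
    rw [List.length_take]
    omega

-- conversely, a table prefix of the path is found by the lookup at its length
theorem pv_look_of_prefix (path : String) (p nm : String)
    (hp : (p, nm) ∈ PV_PREFIX_TO_GROUP.items) (hpre : p.toList <+: path.toList) :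
    pvLook path ((p.toList.length : Int)) = some nm := by
  have hle : p.toList.length ≤ path.toList.length := hpre.length_le
  have hs : PySem.Str.slice path none (some (p.toList.length : Int)) = p := by
    apply String.toList_inj.mp
    rw [pv_toList_slice_take path _ (by positivity)]
    simp only [Int.toNat_natCast]
    exact (List.prefix_iff_eq_take.mp hpre).symm
  unfold pvLook
  rw [hs]
  exact (PySem.Dict.get?_eq_some_iff_mem_items PV_PREFIX_TO_GROUP _ nm pv_H8).mpr hp

-- THE CRUX: for each group, the lookup loop emits its name exactly once iff some
-- prefix of the group matches the path, never more than once
theorem pv_count_E (path : String) (nm : String) (ps : List String)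
    (hg : (nm, ps) ∈ PV_GROUPS) :
    (pvE path).count nm = if pvMatchB path ps then 1 else 0 := by
  unfold pvE
  rw [List.count_filterMap]
  by_cases hM : pvMatchB path ps = true
  · rw [if_pos hM]
    obtain ⟨p, hpmem, hsw⟩ := List.any_eq_true.mp hM
    have hpre : p.toList <+: path.toList := by
      rw [PySem.Str.startswith_eq] at hsw
      exact (PySem.Chars.startswith_iff _ _).mp hsw
    have hcongr : ∀ l ∈ pvLens path,
        (pvLook path l == some nm) = true ↔ (l == (p.toList.length : Int)) = true := by
      intro l hl
      simp only [beq_iff_eq]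
      constructor
      · intro hlook
        obtain ⟨s, hsmem, hspre, hslen⟩ := pv_look_some path l nm hl hlook
        have hs_ps : s ∈ ps := pv_H1 (nm, ps) hg (s, nm) hsmem rfl
        have : s = p := by
          rcases List.prefix_or_prefix_of_prefix hspre hpre with hc | hc
          · exact pv_H3 (nm, ps) hg s hs_ps p hpmem hc
          · exact (pv_H3 (nm, ps) hg p hpmem s hs_ps hc).symm
        rw [← hslen, this]
      · intro hleq
        rw [hleq]
        exact pv_look_of_prefix path p nm (pv_H2 (nm, ps) hg p hpmem) hpre
    rw [List.countP_congr hcongr]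
    have hcount : (pvLens path).count ((p.toList.length : Int)) = 1 := by
      have hmem : ((p.toList.length : Int)) ∈ pvLens path :=
        pv_mem_pvLens_of path _ (pv_H4 (nm, ps) hg p hpmem) (by exact_mod_cast hpre.length_le)
      have hnd : (pvLens path).Nodup := (List.takeWhile_sublist _).nodup pv_H7
      exact le_antisymm (List.nodup_iff_count_le_one.mp hnd _) (List.count_pos_iff.mpr hmem)
    simpa [List.count] using hcount
  · rw [if_neg hM]
    apply List.countP_eq_zero.mpr
    intro l hl hpred
    obtain ⟨s, hsmem, hspre, _⟩ :=
      pv_look_some path l nm hl (by simpa using hpred)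
    have hs_ps : s ∈ ps := pv_H1 (nm, ps) hg (s, nm) hsmem rfl
    apply hM
    apply List.any_eq_true.mpr
    exact ⟨s, hs_ps, by rw [PySem.Str.startswith_eq]; exact (PySem.Chars.startswith_iff _ _).mpr hspre⟩

-- processing one path over a group-shaped dict appends it to exactly the matching groups
-- the filtered pair list of the emitted names is a replicate of the path
theorem pv_pairs (E : List String) (k path : String) :
    ((E.map (fun nm => (nm, path))).filter (fun pr => pr.1 == k)).map (·.2)
    = List.replicate (E.count k) path := by
  induction E with
  | nil => simp
  | cons nm E ih =>
      by_cases h : nm = k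
      · subst h
        simp [List.replicate_succ, ih]
      · have : (nm == k) = false := beq_eq_false_iff_ne.mpr h
        simp [List.count_cons, this, ih]

-- a modify-loop whose keys are all present leaves the key list unchanged
theorem pv_fold_keys (E : List (String × String)) (d : PySem.Dict String (List String))
    (h : ∀ pr ∈ E, d.contains pr.1 = true) :
    (E.foldl (fun d pr => PySem.Dict.modify d pr.1 [] (fun xs => xs ++ [pr.2])) d).keys = d.keys := by
  induction E generalizing d with
  | nil => rfl
  | cons pr E ih =>
      simp only [List.foldl_cons]
      have hk : (PySem.Dict.modify d pr.1 [] (fun xs => xs ++ [pr.2])).keys = d.keys := by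
        rw [PySem.Dict.keys_modify]
        exact PySem.Dict.keys_insert_of_contains _ _ (h pr (by simp))
      rw [ih _ (fun q hq => by
        rw [PySem.Dict.contains_modify]
        simp [h q (by simp [hq])])]
      exact hk

theorem pv_stepDict (path : String) (f : String × List String → List String) :
    pvInner path (PySem.Dict.mk (PV_GROUPS.map (fun g => (g.1, f g))))
    = PySem.Dict.mk (PV_GROUPS.map (fun g =>
        (g.1, f g ++ (if pvMatchB path g.2 then [path] else [])))) := by
  unfold pvInner
  rw [pv_foldl_match]
  rw [show (pvLens path).filterMap (pvLook path) = pvE path from rfl]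
  set d0 : PySem.Dict String (List String) := PySem.Dict.mk (PV_GROUPS.map (fun g => (g.1, f g))) with hd0
  have hkeys0 : d0.keys = pvNames := by
    simp [hd0, PySem.Dict.keys, pvNames, List.map_map]
  have hnd0 : d0.keys.Nodup := by rw [hkeys0]; decide
  have hfold : (pvE path).foldl
      (fun grouped name => PySem.Dict.modify grouped name [] (fun xs => xs ++ [path])) d0
      = ((pvE path).map (fun nm => (nm, path))).foldl
          (fun d pr => PySem.Dict.modify d pr.1 [] (fun xs => xs ++ [pr.2])) d0 := by
    rw [List.foldl_map]
  rw [hfold]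
  set d' := ((pvE path).map (fun nm => (nm, path))).foldl
      (fun d pr => PySem.Dict.modify d pr.1 [] (fun xs => xs ++ [pr.2])) d0 with hd'
  have hkeys' : d'.keys = pvNames := by
    rw [hd', pv_fold_keys _ d0 (fun pr hpr => by
      rcases List.mem_map.mp hpr with ⟨nm, hnm, rfl⟩
      exact (PySem.Dict.contains_iff_mem_keys _ _).mpr
        (by rw [hkeys0]; exact pv_E_subset_names path nm hnm))]
    exact hkeys0
  have hnd' : d'.keys.Nodup := by rw [hkeys']; decide
  apply PySem.Dict.ext
  rw [PySem.Dict.items_eq_map_keys d' hnd' [], hkeys']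
  have hrhs : (PySem.Dict.mk (PV_GROUPS.map (fun g =>
      (g.1, f g ++ (if pvMatchB path g.2 then [path] else []))))).items
      = PV_GROUPS.map (fun g => (g.1, f g ++ (if pvMatchB path g.2 then [path] else []))) := rfl
  rw [hrhs]
  unfold pvNames
  rw [List.map_map]
  apply List.map_congr_left
  intro g hgmem
  simp only [Function.comp]
  congr 1
  have hget : d'.getD g.1 [] = d0.getD g.1 [] ++
      (((pvE path).map (fun nm => (nm, path))).filter (fun pr => pr.1 == g.1)).map (·.2) := by
    rw [hd']
    exact PySem.Dict.getD_foldl_modify_append _ d0 g.1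
  have hget0 : d0.getD g.1 [] = f g := by
    apply PySem.Dict.getD_of_mem_items _ _ hnd0
    rw [hd0]
    exact List.mem_map_of_mem hgmem
  rw [hget, hget0, pv_pairs, pv_count_E path g.1 g.2 (by exact hgmem)]
  by_cases h : pvMatchB path g.2 = true <;> simp [h]

-- B's catalog fold, fully characterized
theorem pv_B_fold (catalog : List (List (String × String)))
    (f : String × List String → List String) :
    catalog.foldl (fun grouped entry => pvInner (pvGetPathB entry) grouped)
      (PySem.Dict.mk (PV_GROUPS.map (fun g => (g.1, f g))))
    = PySem.Dict.mk (PV_GROUPS.map (fun g =>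
        (g.1, f g ++ (catalog.map pvGetPathB).filter (fun p => pvMatchB p g.2)))) := by
  induction catalog generalizing f with
  | nil => simp
  | cons e rest ih =>
      simp only [List.foldl_cons]
      rw [pv_stepDict (pvGetPathB e) f]
      rw [ih (fun g => f g ++ (if pvMatchB (pvGetPathB e) g.2 then [pvGetPathB e] else []))]
      simp only [List.map_cons, List.filter_cons]
      congr 1
      apply List.map_congr_left
      intro g _
      by_cases h : pvMatchB (pvGetPathB e) g.2 = true <;> simp [h]

-- A's and B's match tests agree (path == p is subsumed by startswith)
theorem pv_match_eq (path : String) (ps : List String) :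
    pvMatchA path ps = pvMatchB path ps := by
  apply PySem.List.any_congr_mem
  intro p _
  by_cases h : path = p
  · subst h
    have hsw : PySem.Chars.startswith path.toList path.toList = true :=
      (PySem.Chars.startswith_iff _ _).mpr (List.prefix_refl _)
    simp [PySem.Str.startswith_eq, hsw]
  · have hne : (path == p) = false := beq_eq_false_iff_ne.mpr h
    simp [hne]

theorem pv_main (catalog : List (List (String × String))) :
    group_interactable_modules catalog = group_interactable_modules_alt catalog := by
  simp only [group_interactable_modules, group_interactable_modules_alt]
  rw [PySem.List.foldl_append_singleton_eq_map
        (f := fun g : String × List String =>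
          (g.1, (catalog.map pvGetPathA).filter (fun path => pvMatchA path g.2)))]
  rw [pv_B_fold catalog (fun _ => [])]
  simp only [List.nil_append]
  apply List.map_congr_left
  intro g _
  congr 1
  apply List.filter_congr
  intro p _
  exact pv_match_eq p g.2

-- ===== VERDICT (by name: the statement is the Claim_ definition above) =====
theorem group_interactable_modules_spec : Claim_equal_group_interactable_modules := by
  intro catalog _ _
  exact pv_main catalog
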